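-- pv_equiv track=rewrite | github.com/iinaki/tda-grupito | tp2/main.py | algoritmo_nuevo
-- ===== SOURCE A (Python) =====
-- def algoritmo_nuevo(x,f,n):
--     if n == 0:
--         return 0
--
--     OPT = [[0] * (n+1) for _ in range(n+1)]
--     OPT[1][1] = min(f[1],x[1])
--
--     for m in range(2, n+1):
--         for j in range(1, m+1):
--             OPT[m][j] = max(OPT[m][j-1], (OPT[m-j][m-j] + min(f[j], x[m])))
--
--     return OPT
-- ===== SOURCE B (Python) =====
-- def algoritmo_nuevo(x, f, n):
--     if n == 0:
--         return 0
--     # d[m] = value of the diagonal cell OPT[m][m]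
--     d = [0] * (n + 1)
--     d[1] = min(f[1], x[1])
--     for m in range(2, n + 1):
--         xm = x[m]
--         d[m] = max(0, max(d[m - k] + min(f[k], xm) for k in range(1, m + 1)))
--
--     def cell(m, j):
--         if m == 1:
--             return d[1] if j == 1 else 0
--         if j < 1 or j > m:
--             return 0
--         xm = x[m]
--         return max(0, max(d[m - k] + min(f[k], xm) for k in range(1, j + 1)))
--
--     return [[0] * (n + 1)] + [[cell(m, j) for j in range(n + 1)]
--                               for m in range(1, n + 1)]
-- ===== Notes on version B (the rewrite author's own statement) =====
-- stated objective: alternative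
-- what changed: B precomputes the diagonal vector d[m]=OPT[m][m] and derives every cell OPT[m][j] by a direct max-scan over all choices k=1..j, instead of A in-place table filling that reuses the left neighbour OPT[m][j-1] as a running prefix maximum.
-- outside the precondition, e.g. on algoritmo_nuevo([], [], 0): A returns 0, B returns 0
import Mathlib
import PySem

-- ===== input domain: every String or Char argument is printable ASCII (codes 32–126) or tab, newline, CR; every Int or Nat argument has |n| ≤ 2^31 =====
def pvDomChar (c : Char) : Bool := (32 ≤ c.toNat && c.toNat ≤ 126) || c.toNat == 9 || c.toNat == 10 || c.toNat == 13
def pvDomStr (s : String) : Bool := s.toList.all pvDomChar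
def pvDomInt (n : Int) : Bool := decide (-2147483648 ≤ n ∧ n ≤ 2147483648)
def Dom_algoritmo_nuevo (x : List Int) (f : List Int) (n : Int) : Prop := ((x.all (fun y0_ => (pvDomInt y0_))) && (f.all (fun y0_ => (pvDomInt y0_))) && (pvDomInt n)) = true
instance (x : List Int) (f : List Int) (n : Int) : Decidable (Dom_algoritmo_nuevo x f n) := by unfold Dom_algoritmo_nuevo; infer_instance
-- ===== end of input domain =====

-- B re-derives every cell OPT[m][j] from a precomputed diagonal vector by a direct
-- max-scan over the choices k=1..j, instead of A's in-place table with a running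
-- prefix maximum; same table, alternative algorithm (not faster).

-- ===== PORT A =====
-- Python's `return 0` on n == 0 is an int, not a table; that input is excluded by
-- Pre_algoritmo_nuevo, and the port returns [] there.
def algoritmo_nuevo (x : List Int) (f : List Int) (n : Int) : List (List Int) :=
  if n = 0 then []
  else
    let OPT0 := List.replicate (n+1).toNat (List.replicate (n+1).toNat (0:Int))
    let OPT1 := OPT0.set 1 ((OPT0.getD 1 []).set 1 (min (f.getD 1 0) (x.getD 1 0)))
    (PySem.List.pyRange 2 (n+1) 1).foldl (fun t m =>
      (PySem.List.pyRange 1 (m+1) 1).foldl (fun t j =>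
        let v := max ((t.getD m.toNat []).getD (j-1).toNat 0)
                     (((t.getD (m-j).toNat []).getD (m-j).toNat 0) +
                       min (f.getD j.toNat 0) (x.getD m.toNat 0))
        t.set m.toNat ((t.getD m.toNat []).set j.toNat v)) t) OPT1

-- ===== PORT B =====
def cellB (x : List Int) (f : List Int) (d : List Int) (m : Nat) (j : Nat) : Int :=
  if m = 1 then (if j = 1 then d.getD 1 0 else 0)
  else if j < 1 ∨ m < j then 0
  else ((List.range' 1 j).map (fun k => d.getD (m-k) 0 + min (f.getD k 0) (x.getD m 0))).foldl max 0

def algoritmo_nuevo_alt (x : List Int) (f : List Int) (n : Int) : List (List Int) :=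
  if n = 0 then []
  else
    let N := n.toNat
    let d0 := (List.replicate (N+1) (0:Int)).set 1 (min (f.getD 1 0) (x.getD 1 0))
    let d := (List.range' 2 (N-1)).foldl (fun d m =>
        d.set m (((List.range' 1 m).map
          (fun k => d.getD (m-k) 0 + min (f.getD k 0) (x.getD m 0))).foldl max 0)) d0
    List.replicate (N+1) (0:Int) :: (List.range' 1 N).map (fun m =>
        (List.range (N+1)).map (fun j => cellB x f d m j))

-- ===== PRECONDITION & SPEC =====
-- Pre_ excludes n == 0, where A returns the int 0 (not a table, so not a value of the
-- declared return type), and the inputs where A raises: n < 0 or a list too short for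
-- the 1-based indices f[1..n], x[1..n] (IndexError).
def Pre_algoritmo_nuevo (x : List Int) (f : List Int) (n : Int) : Prop :=
  1 ≤ n ∧ n < (x.length : Int) ∧ n < (f.length : Int)
instance (x : List Int) (f : List Int) (n : Int) : Decidable (Pre_algoritmo_nuevo x f n) := by
  unfold Pre_algoritmo_nuevo; infer_instance
def pvWitness_algoritmo_nuevo : List Int × List Int × Int := ([5, 3, 7], [1, 4, 2], 2)

def Spec_algoritmo_nuevo (x : List Int) (f : List Int) (n : Int) (out : List (List Int)) : Prop := out = algoritmo_nuevo_alt x f n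
instance (x : List Int) (f : List Int) (n : Int) (out : List (List Int)) : Decidable (Spec_algoritmo_nuevo x f n out) := by unfold Spec_algoritmo_nuevo; infer_instance

-- ===== CLAIM (what is proved, stated in full; the proofs are below) =====
def Claim_equal_algoritmo_nuevo : Prop := ∀ (x : List Int) (f : List Int) (n : Int), Dom_algoritmo_nuevo x f n → Pre_algoritmo_nuevo x f n → Spec_algoritmo_nuevo x f n (algoritmo_nuevo x f n)

-- ===== LEMMAS AND PROOFS =====

-- The recurrence both programs compute: C m j is the final value of cell OPT[m][j].
def C (x : List Int) (f : List Int) : Nat → Nat → Int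
  | 0, _ => 0
  | _+1, 0 => 0
  | 1, 1 => min (f.getD 1 0) (x.getD 1 0)
  | 1, _+2 => 0
  | (m+2), (j+1) =>
      if m+2 < j+1 then 0
      else max (C x f (m+2) j)
               (C x f (m+2-(j+1)) (m+2-(j+1)) + min (f.getD (j+1) 0) (x.getD (m+2) 0))
  termination_by m j => (m, j)
  decreasing_by
  · exact Prod.Lex.right _ (Nat.lt_succ_self _)
  · exact Prod.Lex.left _ _ (by omega)

theorem C_zero_of_gt (x f : List Int) (m j : Nat) (h : m < j) : C x f m j = 0 := by
  match m, j with
  | 0, _ => simp [C]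
  | 1, 1 => omega
  | 1, j+2 => simp [C]
  | m+2, j+1 => simp only [C]; rw [if_pos h]

theorem C_zero_right (x f : List Int) (m : Nat) : C x f m 0 = 0 := by
  match m with
  | 0 => simp [C]
  | m+1 => simp [C]

theorem C_step (x f : List Int) (m j : Nat) (hm : 2 ≤ m) (hj1 : 1 ≤ j) (hjm : j ≤ m) :
    C x f m j = max (C x f m (j-1))
      (C x f (m-j) (m-j) + min (f.getD j 0) (x.getD m 0)) := by
  match m, j with
  | m+2, j+1 =>
    simp only [C]
    rw [if_neg (by omega)]
    simp

-- prefix-max characterisation used by B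
theorem C_scan (x f : List Int) (m j : Nat) (hm : 2 ≤ m) (hj1 : 1 ≤ j) (hjm : j ≤ m) :
    C x f m j = ((List.range' 1 j).map
      (fun k => C x f (m-k) (m-k) + min (f.getD k 0) (x.getD m 0))).foldl max 0 := by
  induction j with
  | zero => omega
  | succ j ih =>
    rcases Nat.eq_zero_or_pos j with h0 | hpos
    · subst h0
      rw [C_step x f m 1 hm (le_refl 1) (by omega)]
      simp [C_zero_right]
    · rw [C_step x f m (j+1) hm (by omega) hjm]
      rw [show List.range' 1 (j+1) = List.range' 1 j ++ [1+j] by simp [List.range'_concat]]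
      rw [List.map_append, List.foldl_append]
      rw [show j + 1 - 1 = j from rfl, ih hpos (by omega)]
      simp [Nat.add_comm 1 j]

-- the canonical result table
def target (x f : List Int) (N : Nat) : List (List Int) :=
  (List.range (N+1)).map (fun a => (List.range (N+1)).map (fun b => C x f a b))

-- the diagonal vector built by B
def dstep (x f : List Int) (d : List Int) (m : Nat) : List Int :=
  d.set m (((List.range' 1 m).map
    (fun k => d.getD (m-k) 0 + min (f.getD k 0) (x.getD m 0))).foldl max 0)

def dvec (x f : List Int) (N t : Nat) : List Int :=
  (List.range' 2 t).foldl (dstep x f)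
    ((List.replicate (N+1) (0:Int)).set 1 (min (f.getD 1 0) (x.getD 1 0)))

theorem dvec_inv (x f : List Int) (N : Nat) (hN : 1 ≤ N) (t : Nat) (ht : t ≤ N - 1) :
    (dvec x f N t).length = N+1 ∧
    ∀ m, m < t+2 → (dvec x f N t).getD m 0 = C x f m m := by
  induction t with
  | zero =>
    constructor
    · simp [dvec]
    · intro m hm
      interval_cases m
      · simp [dvec, List.getD]
        simp [C]
      · simp [dvec, List.getD]
        rw [List.getElem?_set_self (by simp; omega)]
        simp [C]
  | succ t ih =>
    have ih' := ih (by omega)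
    have hlen : (dvec x f N (t+1)).length = N+1 := by
      rw [dvec, List.range'_concat, List.foldl_append]
      simpa [dstep] using ih'.1
    refine ⟨hlen, ?_⟩
    have hstep : dvec x f N (t+1) = dstep x f (dvec x f N t) (2+t) := by
      rw [dvec, List.range'_concat, List.foldl_append]
      simp only [one_mul, List.foldl_cons, List.foldl_nil]
      rfl
    have hval : ((List.range' 1 (2+t)).map
        (fun k => (dvec x f N t).getD (2+t-k) 0 + min (f.getD k 0) (x.getD (2+t) 0))).foldl max 0
        = C x f (2+t) (2+t) := by
      rw [List.map_congr_left (fun k hk => ?_), (C_scan x f (2+t) (2+t) (by omega) (by omega) (le_refl _)).symm]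
      rw [List.mem_range'] at hk
      rw [ih'.2 (2+t-k) (by omega)]
    intro m hm
    rcases Nat.lt_or_ge m (t+2) with h | h
    · rw [hstep, dstep]
      rw [List.getD, List.getElem?_set_ne (by omega)]
      exact ih'.2 m h
    · have hm2 : m = 2+t := by omega
      subst hm2
      rw [hstep, dstep, List.getD, List.getElem?_set_self (by rw [ih'.1]; omega)]
      simpa using hval

theorem cellB_eq (x f : List Int) (N : Nat) (d : List Int)
    (hd : ∀ m, m < N+1 → d.getD m 0 = C x f m m)
    (m j : Nat) (hm1 : 1 ≤ m) (hmN : m ≤ N) :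
    cellB x f d m j = C x f m j := by
  rcases Nat.lt_or_ge m 2 with h2 | h2
  · have : m = 1 := by omega
    subst this
    rw [cellB, if_pos rfl]
    rcases Nat.lt_trichotomy j 1 with h | h | h
    · have : j = 0 := by omega
      subst this; simp [C]
    · subst h
      rw [if_pos rfl, hd 1 (by omega)]
    · rw [if_neg (by omega), C_zero_of_gt x f 1 j h]
  · rw [cellB, if_neg (by omega)]
    rcases Nat.lt_or_ge j 1 with hj | hj
    · have : j = 0 := by omega
      subst this
      simp [C_zero_right]
    · rcases Nat.lt_or_ge m j with hmj | hmj
      · rw [if_pos (Or.inr hmj), C_zero_of_gt x f m j hmj]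
      · rw [if_neg (by omega)]
        rw [C_scan x f m j h2 hj hmj]
        congr 1
        refine List.map_congr_left (fun k hk => ?_)
        rw [List.mem_range'] at hk
        rw [hd (m-k) (by omega)]

theorem B_eq_target (x f : List Int) (n : Int) (hn : 1 ≤ n) :
    algoritmo_nuevo_alt x f n = target x f n.toNat := by
  have hn0 : ¬ (n = 0) := by omega
  have hN : 1 ≤ n.toNat := by omega
  rw [algoritmo_nuevo_alt, if_neg hn0]
  have hd := dvec_inv x f n.toNat hN (n.toNat - 1) (le_refl _)
  have hd2 : ∀ m, m < n.toNat + 1 → (dvec x f n.toNat (n.toNat-1)).getD m 0 = C x f m m :=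
    fun m hm => hd.2 m (by omega)
  show List.replicate (n.toNat+1) (0:Int) :: (List.range' 1 n.toNat).map (fun m =>
      (List.range (n.toNat+1)).map (fun j => cellB x f (dvec x f n.toNat (n.toNat-1)) m j))
      = target x f n.toNat
  apply List.ext_getElem
  · simp [target]
  · intro a ha1 ha2
    simp only [target, List.getElem_map, List.getElem_range] at ha2 ⊢
    match a, ha1 with
    | 0, _ =>
      simp only [List.getElem_cons_zero]
      apply List.ext_getElem
      · simp
      · intro b hb1 hb2
        simp at hb1
        simp [List.getElem_replicate]
        simp [C]
    | a+1, ha1 =>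
      simp only [List.getElem_cons_succ, List.getElem_map, List.getElem_range']
      apply List.ext_getElem
      · simp
      · intro b hb1 hb2
        simp only [List.getElem_map, List.getElem_range]
        have ha' : a + 1 ≤ n.toNat := by
          simp at ha1; omega
        rw [show 1 + 1 * a = 1 + a by omega]
        rw [cellB_eq x f n.toNat _ hd2 (1+a) b (by omega) (by omega)]
        rw [Nat.add_comm 1 a]

-- Nat-indexed form of A's inner update
def astepN (x f : List Int) (m : Nat) (t : List (List Int)) (r : Nat) : List (List Int) :=
  t.set m ((t.getD m []).set r
    (max ((t.getD m []).getD (r-1) 0)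
         ((t.getD (m-r) []).getD (m-r) 0 + min (f.getD r 0) (x.getD m 0))))

def optInit (x f : List Int) (N : Nat) : List (List Int) :=
  (List.replicate (N+1) (List.replicate (N+1) (0:Int))).set 1
    (((List.replicate (N+1) (List.replicate (N+1) (0:Int))).getD 1 []).set 1
      (min (f.getD 1 0) (x.getD 1 0)))

-- loop invariant: rows < m final, row m final up to column r, rest untouched (0)
def InvRow (x f : List Int) (N m r : Nat) (t : List (List Int)) : Prop :=
  t.length = N+1 ∧ (∀ a, a ≤ N → (t.getD a []).length = N+1) ∧
  ∀ a b, a ≤ N → b ≤ N →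
    (t.getD a []).getD b 0 =
      if a < m then C x f a b else if a = m ∧ b ≤ r then C x f a b else 0

theorem getD_set_outer (t : List (List Int)) (i a : Nat) (v : List Int) (h : a ≠ i) :
    (t.set i v).getD a [] = t.getD a [] := by
  simp [List.getD, List.getElem?_set_ne (by omega : i ≠ a)]

theorem getD_set_outer_self (t : List (List Int)) (i : Nat) (v : List Int) (h : i < t.length) :
    (t.set i v).getD i [] = v := by
  simp [List.getD, List.getElem?_set_self h]

theorem InvRow_shift (x f : List Int) (N m : Nat) (t : List (List Int))
    (h : InvRow x f N m m t) : InvRow x f N (m+1) 0 t := by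
  refine ⟨h.1, h.2.1, fun a b ha hb => ?_⟩
  rw [h.2.2 a b ha hb]
  by_cases h1 : a < m + 1
  · rw [if_pos h1]
    by_cases h0 : a < m
    · rw [if_pos h0]
    · have : a = m := by omega
      subst this
      rw [if_neg h0]
      by_cases h2 : b ≤ a
      · rw [if_pos ⟨rfl, h2⟩]
      · rw [if_neg (fun hh => h2 hh.2), C_zero_of_gt x f a b (by omega)]
  · rw [if_neg h1, if_neg (by omega), if_neg (by omega)]
    by_cases h4 : a = m + 1 ∧ b ≤ 0
    · rw [if_pos h4]
      obtain ⟨rfl, hb0⟩ := h4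
      rw [show b = 0 from by omega, C_zero_right]
    · rw [if_neg h4]

theorem astepN_inv (x f : List Int) (N m r : Nat) (t : List (List Int))
    (hm : 2 ≤ m) (hmN : m ≤ N) (hr : r + 1 ≤ m)
    (h : InvRow x f N m r t) : InvRow x f N m (r+1) (astepN x f m t (1+r)) := by
  obtain ⟨hlen, hrow, hcell⟩ := h
  have hmlt : m < t.length := by omega
  have hrowm : (t.getD m []).length = N+1 := hrow m hmN
  have hv : max ((t.getD m []).getD ((1+r)-1) 0)
      ((t.getD (m-(1+r)) []).getD (m-(1+r)) 0 + min (f.getD (1+r) 0) (x.getD m 0))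
      = C x f m (r+1) := by
    rw [show (1+r)-1 = r from by omega]
    rw [hcell m r hmN (by omega), if_neg (by omega), if_pos ⟨rfl, le_refl r⟩]
    rw [hcell (m-(1+r)) (m-(1+r)) (by omega) (by omega), if_pos (by omega)]
    rw [C_step x f m (r+1) hm (by omega) hr]
    rw [show r+1-1 = r from rfl, show m-(r+1) = m-(1+r) from by omega,
        show (1+r) = r+1 from by omega]
  refine ⟨by simp [astepN, hlen], fun a ha => ?_, fun a b ha hb => ?_⟩
  · rcases eq_or_ne a m with rfl | hne
    · rw [astepN, getD_set_outer_self _ _ _ hmlt, List.length_set]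
      exact hrowm
    · rw [astepN, getD_set_outer _ _ _ _ hne]
      exact hrow a ha
  · rcases eq_or_ne a m with rfl | hne
    · rw [astepN, getD_set_outer_self _ _ _ hmlt, if_neg (by omega)]
      rcases eq_or_ne b (1+r) with rfl | hbne
      · rw [List.getD, List.getElem?_set_self (by omega), Option.getD_some, hv,
            if_pos ⟨rfl, by omega⟩, show 1+r = r+1 from by omega]
      · rw [List.getD, List.getElem?_set_ne (by omega), ← List.getD]
        rw [hcell a b ha hb, if_neg (by omega)]
        by_cases hbr : b ≤ r
        · rw [if_pos ⟨rfl, hbr⟩, if_pos ⟨rfl, by omega⟩]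
        · rw [if_neg (fun hh => hbr hh.2), if_neg (fun hh => hbne (by omega))]
    · rw [astepN, getD_set_outer _ _ _ _ hne, hcell a b ha hb]
      by_cases hc : a < m
      · rw [if_pos hc, if_pos hc]
      · rw [if_neg hc, if_neg hc, if_neg (fun hh => hne hh.1), if_neg (fun hh => hne hh.1)]

theorem row_inv (x f : List Int) (N m : Nat) (hm : 2 ≤ m) (hmN : m ≤ N)
    (t : List (List Int)) (h : InvRow x f N m 0 t) :
    ∀ r, r ≤ m →
      InvRow x f N m r ((List.range r).foldl (fun t i => astepN x f m t (1+i)) t) := by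
  intro r
  induction r with
  | zero => intro _; simpa using h
  | succ r ih =>
    intro hr
    rw [List.range_succ, List.foldl_append, List.foldl_cons, List.foldl_nil]
    exact astepN_inv x f N m r _ hm hmN hr (ih (by omega))

theorem init_inv (x f : List Int) (N : Nat) (hN : 1 ≤ N) :
    InvRow x f N 2 0 (optInit x f N) := by
  have h1 : (1:Nat) < N+1 := by omega
  have hrep : ∀ a, a ≤ N →
      (List.replicate (N+1) (List.replicate (N+1) (0:Int))).getD a [] =
        List.replicate (N+1) (0:Int) := by
    intro a ha
    rw [List.getD, List.getElem?_replicate, if_pos (by omega), Option.getD_some]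
  refine ⟨by simp [optInit], fun a ha => ?_, fun a b ha hb => ?_⟩
  · rcases eq_or_ne a 1 with rfl | hne
    · rw [optInit, getD_set_outer_self _ _ _ (by simp; omega), hrep 1 hN,
          List.length_set, List.length_replicate]
    · rw [optInit, getD_set_outer _ _ _ _ hne, hrep a ha, List.length_replicate]
  · have hb' : b < N+1 := by omega
    rcases eq_or_ne a 1 with rfl | hne
    · rw [optInit, getD_set_outer_self _ _ _ (by simp; omega), hrep 1 hN]
      rw [if_pos (by omega)]
      rcases eq_or_ne b 1 with rfl | hbne
      · rw [List.getD, List.getElem?_set_self (by simp; omega), Option.getD_some]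
        simp [C]
      · rw [List.getD, List.getElem?_set_ne (by omega), List.getElem?_replicate,
            if_pos hb', Option.getD_some]
        rcases Nat.eq_zero_or_pos b with rfl | hbpos
        · simp [C]
        · rw [C_zero_of_gt x f 1 b (by omega)]
    · rw [optInit, getD_set_outer _ _ _ _ hne, hrep a ha, List.getD,
          List.getElem?_replicate, if_pos hb', Option.getD_some]
      by_cases hc : a < 2
      · have : a = 0 := by omega
        subst this
        rw [if_pos hc]
        simp [C]
      · rw [if_neg hc]
        by_cases h2 : a = 2 ∧ b ≤ 0
        · obtain ⟨rfl, hb0⟩ := h2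
          rw [if_pos ⟨rfl, hb0⟩, show b = 0 from by omega, C_zero_right]
        · rw [if_neg h2]

theorem outer_inv (x f : List Int) (N : Nat) (hN : 1 ≤ N) :
    ∀ s, s ≤ N - 1 →
      InvRow x f N (2+s) 0
        ((List.range s).foldl (fun t k =>
          (List.range (2+k)).foldl (fun t i => astepN x f (2+k) t (1+i)) t)
          (optInit x f N)) := by
  intro s
  induction s with
  | zero => intro _; simpa using init_inv x f N hN
  | succ s ih =>
    intro hs
    rw [List.range_succ, List.foldl_append, List.foldl_cons, List.foldl_nil]
    have h := row_inv x f N (2+s) (by omega) (by omega) _ (ih (by omega)) (2+s) (le_refl _)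
    have := InvRow_shift x f N (2+s) _ h
    rw [show 2+s+1 = 2+(s+1) from by omega] at this
    exact this

theorem eq_target_of (x f : List Int) (N : Nat) (t : List (List Int))
    (h1 : t.length = N+1) (h2 : ∀ a, a ≤ N → (t.getD a []).length = N+1)
    (h3 : ∀ a b, a ≤ N → b ≤ N → (t.getD a []).getD b 0 = C x f a b) :
    t = target x f N := by
  apply List.ext_getElem
  · simp [target, h1]
  · intro a ha1 ha2
    simp only [target, List.getElem_map, List.getElem_range]
    have haN : a ≤ N := by omega
    have hrow : t.getD a [] = t[a] := List.getD_eq_getElem t [] ha1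
    apply List.ext_getElem
    · rw [← hrow, h2 a haN]; simp
    · intro b hb1 hb2
      simp only [List.getElem_map, List.getElem_range]
      have hbN : b ≤ N := by
        rw [← hrow, h2 a haN] at hb1; omega
      have := h3 a b haN hbN
      rwa [hrow, List.getD_eq_getElem t[a] 0 hb1] at this

-- A's fold, rewritten over Nat ranges
theorem A_natform (x f : List Int) (n : Int) (hn : 1 ≤ n) :
    algoritmo_nuevo x f n =
      (List.range (n.toNat - 1)).foldl (fun t k =>
        (List.range (2+k)).foldl (fun t i => astepN x f (2+k) t (1+i)) t)
        (optInit x f n.toNat) := by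
  have hn0 : ¬ (n = 0) := by omega
  rw [algoritmo_nuevo, if_neg hn0]
  show (PySem.List.pyRange 2 (n+1) 1).foldl _ _ = _
  rw [show (n+1).toNat = n.toNat + 1 from by omega]
  rw [PySem.List.pyRange_one 2 (n+1)]
  rw [show (n+1-2).toNat = n.toNat - 1 from by omega]
  rw [List.foldl_map]
  rw [show ((List.replicate (n.toNat+1) (List.replicate (n.toNat+1) (0:Int))).set 1
      (((List.replicate (n.toNat+1) (List.replicate (n.toNat+1) (0:Int))).getD 1 []).set 1
        (min (f.getD 1 0) (x.getD 1 0)))) = optInit x f n.toNat from rfl]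
  apply PySem.List.foldl_congr_mem
  intro t k hk
  rw [PySem.List.pyRange_one 1 ((2:Int)+↑k+1)]
  rw [show ((2:Int)+↑k+1-1).toNat = 2+k from by omega]
  rw [List.foldl_map]
  apply PySem.List.foldl_congr_mem
  intro t' i hi
  rw [List.mem_range] at hi
  have e1 : ((2:Int)+↑k).toNat = 2+k := by omega
  have e2 : ((1:Int)+↑i).toNat = 1+i := by omega
  have e3 : ((1:Int)+↑i-1).toNat = (1+i)-1 := by omega
  have e4 : ((2:Int)+↑k-(1+↑i)).toNat = (2+k)-(1+i) := by omega
  show t'.set ((2:Int)+↑k).toNat ((t'.getD ((2:Int)+↑k).toNat []).set ((1:Int)+↑i).toNat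
      (max ((t'.getD ((2:Int)+↑k).toNat []).getD ((1:Int)+↑i-1).toNat 0)
           ((t'.getD ((2:Int)+↑k-(1+↑i)).toNat []).getD ((2:Int)+↑k-(1+↑i)).toNat 0 +
             min (f.getD ((1:Int)+↑i).toNat 0) (x.getD ((2:Int)+↑k).toNat 0)))) = _
  rw [e1, e2, e3, e4, astepN]

theorem A_eq_target (x f : List Int) (n : Int) (hn : 1 ≤ n) :
    algoritmo_nuevo x f n = target x f n.toNat := by
  have hN : 1 ≤ n.toNat := by omega
  rw [A_natform x f n hn]
  have h := outer_inv x f n.toNat hN (n.toNat - 1) (le_refl _)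
  refine eq_target_of x f n.toNat _ h.1 h.2.1 (fun a b ha hb => ?_)
  rw [h.2.2 a b ha hb, if_pos (by omega)]

-- ===== VERDICT (by name: the statement is the Claim_ definition above) =====
theorem algoritmo_nuevo_spec : Claim_equal_algoritmo_nuevo := by
  intro x f n _ hpre
  unfold Spec_algoritmo_nuevo
  rw [A_eq_target x f n hpre.1, B_eq_target x f n hpre.1]
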